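-- pv_equiv track=rewrite | github.com/djok/fiberq | server/api/sync/differ.py | _features_differ
-- ===== SOURCE A (Python) =====
-- def _features_differ(feat_a: dict, feat_b: dict) -> bool:
--     """Check if two feature dicts have different attribute values."""
--     # Compare all non-system fields
--     skip = {"id", "fid", "geometry", "geom", "_modified_at", "_modified_by_sub"}
--     for key in set(feat_a.keys()) | set(feat_b.keys()):
--         if key in skip:
--             continue
--         va = feat_a.get(key)
--         vb = feat_b.get(key)
--         # Normalize None vs empty string
--         if va == "" and vb is None:
--             continue
--         if va is None and vb == "":
--             continue
--         if va != vb: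
--             return True
--     return False
-- ===== SOURCE B (Python) =====
-- def _features_differ(feat_a: dict, feat_b: dict) -> bool:
--     """Check if two feature dicts have different attribute values."""
--     skip = {"id", "fid", "geometry", "geom", "_modified_at", "_modified_by_sub"}
--
--     def norm(feat: dict) -> dict:
--         # keep only non-system entries with a meaningful value;
--         # dropping None/"" entries makes absent, None and "" all compare equal
--         return {k: v for k, v in feat.items()
--                 if k not in skip and v is not None and v != ""}
--
--     return norm(feat_a) != norm(feat_b)
-- ===== Notes on version B (the rewrite author's own statement) =====
-- stated objective: simpler
-- what changed: Instead of scanning the union of key sets with per-key None/empty-string normalization and an early exit, B canonicalizes each dict once (dropping system keys and None/"" values) and returns a single dict inequality test.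
import Mathlib
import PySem

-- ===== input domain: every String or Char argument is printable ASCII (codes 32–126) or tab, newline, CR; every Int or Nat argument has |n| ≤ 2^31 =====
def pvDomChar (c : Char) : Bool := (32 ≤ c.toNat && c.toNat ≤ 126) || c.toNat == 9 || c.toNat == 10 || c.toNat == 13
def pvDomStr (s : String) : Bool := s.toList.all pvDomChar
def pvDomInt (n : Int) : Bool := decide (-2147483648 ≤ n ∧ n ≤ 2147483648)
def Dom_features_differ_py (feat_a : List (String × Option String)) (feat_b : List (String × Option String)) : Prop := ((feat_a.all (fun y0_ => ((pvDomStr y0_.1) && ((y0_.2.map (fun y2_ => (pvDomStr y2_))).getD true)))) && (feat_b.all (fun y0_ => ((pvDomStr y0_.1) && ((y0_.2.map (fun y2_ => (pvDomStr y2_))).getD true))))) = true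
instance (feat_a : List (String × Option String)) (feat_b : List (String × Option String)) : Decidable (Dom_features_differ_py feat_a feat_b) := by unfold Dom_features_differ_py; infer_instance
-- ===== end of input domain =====

-- B canonicalizes each dict once (dropping system keys and None/"" values) and compares the two
-- canonical dicts, instead of A's scan over the union of key sets with per-key normalization: simpler.

-- ===== PORT A =====
def pvSkip : List String := ["id", "fid", "geometry", "geom", "_modified_at", "_modified_by_sub"]

-- the body of A's loop for one key (continue → false, return True → true)
def pvAKeyDiffers (da db : PySem.Dict String (Option String)) (key : String) : Bool :=
  if PySem.Set.contains (PySem.Set.ofList pvSkip) key then false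
  else
    let va := (da.get? key).getD none   -- feat_a.get(key): absent and None both give None
    let vb := (db.get? key).getD none
    if va == some "" && vb == none then false
    else if va == none && vb == some "" then false
    else va != vb

-- the loop over the key set returns True iff SOME key differs — order-independent, ported as `any`
def features_differ_py (feat_a : List (String × Option String)) (feat_b : List (String × Option String)) : Bool :=
  let da := PySem.Dict.ofList feat_a
  let db := PySem.Dict.ofList feat_b
  (PySem.Set.union (PySem.Set.ofList (PySem.Dict.keys da)) (PySem.Dict.keys db)).any
    (pvAKeyDiffers da db)

-- ===== PORT B =====
-- one entry of the dict comprehension in norm(): kept iff key not skipped and value not None/""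
def pvNormEntry (kv : String × Option String) : Option (String × String) :=
  match kv.2 with
  | some v => if pvSkip.contains kv.1 || v == "" then none else some (kv.1, v)
  | none => none

def pvNormFeat (feat : List (String × Option String)) : PySem.Dict String String :=
  PySem.Dict.mk ((PySem.Dict.ofList feat).items.filterMap pvNormEntry)

-- norm(feat_a) != norm(feat_b): Python dict equality ignores order, and the keys of each
-- canonical dict are unique, so it is exactly item-set equality
def features_differ_py_alt (feat_a : List (String × Option String)) (feat_b : List (String × Option String)) : Bool :=
  !(PySem.Set.equal (pvNormFeat feat_a).items (pvNormFeat feat_b).items)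

-- ===== PRECONDITION & SPEC =====
def Spec_features_differ_py (feat_a : List (String × Option String)) (feat_b : List (String × Option String)) (out : Bool) : Prop := out = features_differ_py_alt feat_a feat_b
instance (feat_a : List (String × Option String)) (feat_b : List (String × Option String)) (out : Bool) : Decidable (Spec_features_differ_py feat_a feat_b out) := by unfold Spec_features_differ_py; infer_instance

-- ===== CLAIM (what is proved, stated in full; the proofs are below) =====
def Claim_equal_features_differ_py : Prop := ∀ (feat_a : List (String × Option String)) (feat_b : List (String × Option String)), Dom_features_differ_py feat_a feat_b → Spec_features_differ_py feat_a feat_b (features_differ_py feat_a feat_b)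

-- ===== LEMMAS AND PROOFS =====

-- the common normal form: value of key k after None/"" collapsing (none = "no meaningful value")
def pvG : Option String → Option String
  | some s => if s = "" then none else some s
  | none => none

def pvH (feat : List (String × Option String)) (k : String) : Option String :=
  if k ∈ pvSkip then none else pvG (((PySem.Dict.ofList feat).get? k).getD none)

lemma pvAKeyDiffers_false_iff (fa fb : List (String × Option String)) (k : String) :
    pvAKeyDiffers (PySem.Dict.ofList fa) (PySem.Dict.ofList fb) k = false ↔ pvH fa k = pvH fb k := by
  unfold pvAKeyDiffers pvH
  by_cases hs : k ∈ pvSkip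
  · simp [PySem.Set.contains_iff, PySem.Set.mem_ofList, hs]
  · have hc : PySem.Set.contains (PySem.Set.ofList pvSkip) k = false := by
      rw [Bool.eq_false_iff]
      intro h
      exact hs ((PySem.Set.mem_ofList _ _).mp ((PySem.Set.contains_iff _ _).mp h))
    rcases h1 : ((PySem.Dict.ofList fa).get? k).getD none with _ | s <;>
      rcases h2 : ((PySem.Dict.ofList fb).get? k).getD none with _ | t <;>
      simp [hc, hs, pvG] <;> split_ifs <;> simp_all
lemma pvA_false_iff (fa fb : List (String × Option String)) :
    features_differ_py fa fb = false ↔ ∀ k, pvH fa k = pvH fb k := by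
  unfold features_differ_py
  simp only [List.any_eq_false]
  constructor
  · intro h k
    by_cases hk : k ∈ PySem.Set.union (PySem.Set.ofList (PySem.Dict.keys (PySem.Dict.ofList fa))) (PySem.Dict.keys (PySem.Dict.ofList fb))
    · exact (pvAKeyDiffers_false_iff fa fb k).mp (Bool.eq_false_iff.mpr (h k hk))
    · rw [PySem.Set.mem_union, PySem.Set.mem_ofList] at hk
      push_neg at hk
      have ha : (PySem.Dict.ofList fa).get? k = none :=
        (PySem.Dict.get?_eq_none_iff_not_mem_keys _ _).mpr hk.1
      have hb : (PySem.Dict.ofList fb).get? k = none :=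
        (PySem.Dict.get?_eq_none_iff_not_mem_keys _ _).mpr hk.2
      simp [pvH, ha, hb]
  · intro h k _
    exact Bool.eq_false_iff.mp ((pvAKeyDiffers_false_iff fa fb k).mpr (h k))

lemma pvMem_norm_items (fa : List (String × Option String)) (k : String) (v : String) :
    (k, v) ∈ (pvNormFeat fa).items ↔ pvH fa k = some v := by
  have hnd : (PySem.Dict.ofList fa).keys.Nodup := PySem.Dict.nodup_keys_ofList fa
  constructor
  · intro h
    simp only [pvNormFeat, List.mem_filterMap] at h
    obtain ⟨⟨k', w⟩, hmem, heq⟩ := h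
    rcases w with _ | s
    · simp [pvNormEntry] at heq
    · simp only [pvNormEntry] at heq
      split_ifs at heq with hcond
      simp only [Option.some_inj, Prod.mk.injEq] at heq
      obtain ⟨rfl, rfl⟩ := heq
      simp only [Bool.or_eq_true, not_or, beq_iff_eq] at hcond
      obtain ⟨hsk, hne⟩ := hcond
      have hget : (PySem.Dict.ofList fa).get? k' = some (some s) :=
        PySem.Dict.get?_of_mem_items _ hmem hnd
      have hns : k' ∉ pvSkip := fun hm => hsk (by simp [hm])
      simp [pvH, hns, hget, pvG, hne]
  · intro h
    unfold pvH at h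
    by_cases hs : k ∈ pvSkip
    · rw [if_pos hs] at h
      simp at h
    · rw [if_neg hs] at h
      rcases hget : (PySem.Dict.ofList fa).get? k with _ | w
      · rw [hget] at h
        simp [pvG] at h
      · rw [hget] at h
        simp only [Option.getD_some] at h
        rcases w with _ | s
        · simp [pvG] at h
        · simp only [pvG] at h
          by_cases he : s = ""
          · rw [if_pos he] at h
            simp at h
          · rw [if_neg he] at h
            obtain rfl := Option.some_inj.mp h
            have hmem : (k, some s) ∈ (PySem.Dict.ofList fa).items :=
              PySem.Dict.mem_items_of_get?_eq_some _ hget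
            simp only [pvNormFeat, List.mem_filterMap]
            refine ⟨(k, some s), hmem, ?_⟩
            simp [pvNormEntry, he, hs]

lemma pvB_false_iff (fa fb : List (String × Option String)) :
    features_differ_py_alt fa fb = false ↔ ∀ k, pvH fa k = pvH fb k := by
  unfold features_differ_py_alt
  rw [Bool.not_eq_false', PySem.Set.equal_iff]
  constructor
  · intro h k
    rcases hA : pvH fa k with _ | v
    · rcases hB : pvH fb k with _ | w
      · rfl
      · have hthis := (h (k, w)).mpr ((pvMem_norm_items fb k w).mpr hB)
        rw [pvMem_norm_items] at hthis
        rw [hA] at hthis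
        simp at hthis
    · have hthis := (h (k, v)).mp ((pvMem_norm_items fa k v).mpr hA)
      rw [pvMem_norm_items] at hthis
      exact hthis.symm
  · intro h p
    obtain ⟨k, v⟩ := p
    rw [pvMem_norm_items, pvMem_norm_items, h k]

-- ===== VERDICT (by name: the statement is the Claim_ definition above) =====
theorem features_differ_py_spec : Claim_equal_features_differ_py := by
  intro fa fb _
  unfold Spec_features_differ_py
  have h := (pvA_false_iff fa fb).trans (pvB_false_iff fa fb).symm
  rcases hA : features_differ_py fa fb <;> rcases hB : features_differ_py_alt fa fb <;>
    simp_all
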